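-- pv_equiv track=rewrite | github.com/Irench1k/unsafe-code | tools/docs/markdown_generator.py | _cleanup_markdown
-- ===== SOURCE A (Python) =====
-- def _cleanup_markdown(md: str) -> str:
--     """Remove trailing spaces and collapse excessive blank lines outside code fences."""
--     lines = md.splitlines()
--     out: list[str] = []
--     in_code = False
--     fence = "```"
--     blank_streak = 0
--     for ln in lines:
--         stripped = ln.rstrip("\n\r")
--         if stripped.strip().startswith(fence):
--             # Preserve fence lines verbatim and toggle state
--             in_code = not in_code
--             out.append(stripped.rstrip())
--             blank_streak = 0
--             continue
--         if in_code:
--             out.append(ln)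
--             blank_streak = 0 if ln.strip() else blank_streak + 1
--             continue
--         # Outside code: strip trailing spaces
--         trimmed = stripped.rstrip()
--         if trimmed == "":
--             blank_streak += 1
--             if blank_streak <= 1:
--                 out.append("")
--         else:
--             blank_streak = 0
--             out.append(trimmed)
--     return "\n".join(out) + ("\n" if md.endswith("\n") else "")
-- ===== SOURCE B (Python) =====
-- # Segment-based reimplementation: partition lines at fence lines, then clean
-- # each non-code segment independently (rstrip + one-blank-per-run via groupby),
-- # keeping code segments verbatim and fence lines rstripped.
-- from itertools import groupby, takewhile
--
--
-- def _is_fence(ln: str) -> bool: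
--     return ln.strip().startswith("```")
--
--
-- def _collapse(seg: list) -> list:
--     stripped = [ln.rstrip() for ln in seg]
--     out: list = []
--     for blank, grp in groupby(stripped, key=lambda s: s == ""):
--         if blank:
--             out.append("")
--         else:
--             out.extend(grp)
--     return out
--
--
-- def _cleanup_markdown(md: str) -> str:
--     out: list = []
--     in_code = False
--     rest = md.splitlines()
--     while True:
--         seg = list(takewhile(lambda l: not _is_fence(l), rest))
--         rest = rest[len(seg):]
--         out.extend(seg if in_code else _collapse(seg))
--         if not rest:
--             break
--         out.append(rest[0].rstrip())
--         in_code = not in_code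
--         rest = rest[1:]
--     return "\n".join(out) + ("\n" if md.endswith("\n") else "")
-- ===== Notes on version B (the rewrite author's own statement) =====
-- stated objective: alternative
-- what changed: Replaces the single stateful pass with a blank_streak counter by a partition of the lines into fence-delimited segments, each non-code segment cleaned independently with groupby-based blank-run collapsing.
import Mathlib
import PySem

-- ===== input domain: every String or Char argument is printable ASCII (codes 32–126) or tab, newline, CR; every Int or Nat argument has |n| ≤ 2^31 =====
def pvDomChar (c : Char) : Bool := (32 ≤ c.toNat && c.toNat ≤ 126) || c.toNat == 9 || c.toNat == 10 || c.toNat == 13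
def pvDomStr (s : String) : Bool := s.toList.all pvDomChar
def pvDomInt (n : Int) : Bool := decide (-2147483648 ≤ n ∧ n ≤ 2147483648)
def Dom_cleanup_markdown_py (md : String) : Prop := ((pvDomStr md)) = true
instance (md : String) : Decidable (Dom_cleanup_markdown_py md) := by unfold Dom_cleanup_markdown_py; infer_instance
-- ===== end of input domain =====

-- B replaces A's single stateful pass (blank_streak counter) by a partition into
-- fence-delimited segments, each non-code segment cleaned independently (alternative decomposition).

-- ===== PORT A =====

-- hand port of str.rstrip("\n\r"): drop trailing chars in {'\n','\r'}; exact
def pvRstripNR (cs : List Char) : List Char :=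
  (cs.reverse.dropWhile (fun c => c == '\n' || c == '\r')).reverse

-- A's loop: out accumulator, in_code flag, blank_streak counter, exactly as the Python
def pvALoop : List (List Char) → List (List Char) → Bool → Int → List (List Char)
  | [], out, _, _ => out
  | ln :: tl, out, in_code, blank_streak =>
    let stripped := pvRstripNR ln
    if PySem.Chars.startswith (PySem.Chars.strip stripped) ['`', '`', '`'] then
      pvALoop tl (out ++ [PySem.Chars.rstrip stripped]) (!in_code) 0
    else if in_code then
      pvALoop tl (out ++ [ln]) in_code (if PySem.Chars.strip ln = [] then blank_streak + 1 else 0)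
    else
      let trimmed := PySem.Chars.rstrip stripped
      if trimmed = [] then
        if blank_streak + 1 ≤ 1 then pvALoop tl (out ++ [[]]) in_code (blank_streak + 1)
        else pvALoop tl out in_code (blank_streak + 1)
      else pvALoop tl (out ++ [trimmed]) in_code 0

def cleanup_markdown_py (md : String) : String :=
  let lines := PySem.Chars.splitlines md.toList
  let out := pvALoop lines [] false 0
  String.ofList (PySem.Chars.join ['\n'] out ++
    (if PySem.Chars.endswith md.toList ['\n'] then ['\n'] else []))

-- ===== PORT B =====

def pvIsFence (ln : List Char) : Bool :=
  PySem.Chars.startswith (PySem.Chars.strip ln) ['`', '`', '`']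

-- groupby(stripped, key = emptiness): one blank kept per blank run, nonblank lines kept
def pvCgo : List (List Char) → List (List Char)
  | [] => []
  | s :: tl =>
    if s = [] then [] :: pvCgo (tl.dropWhile (· = []))
    else s :: pvCgo tl
termination_by l => l.length
decreasing_by
  · have := List.length_dropWhile_le (· = []) tl
    simp; omega
  · simp

def pvCollapse (seg : List (List Char)) : List (List Char) :=
  pvCgo (seg.map PySem.Chars.rstrip)

-- B's loop: take the segment up to the next fence, clean it, emit the fence rstripped, recurse
def pvBGo (lines : List (List Char)) (in_code : Bool) : List (List Char) :=
  let seg := lines.takeWhile (fun l => !pvIsFence l)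
  let part := if in_code then seg else pvCollapse seg
  match h : lines.dropWhile (fun l => !pvIsFence l) with
  | [] => part
  | f :: tl => part ++ PySem.Chars.rstrip f :: pvBGo tl (!in_code)
termination_by lines.length
decreasing_by
  have hle := List.length_dropWhile_le (fun l => !pvIsFence l) lines
  rw [h] at hle
  simp at hle ⊢
  omega

def cleanup_markdown_py_alt (md : String) : String :=
  let lines := PySem.Chars.splitlines md.toList
  let out := pvBGo lines false
  String.ofList (PySem.Chars.join ['\n'] out ++
    (if PySem.Chars.endswith md.toList ['\n'] then ['\n'] else []))

-- ===== PRECONDITION & SPEC =====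
def Spec_cleanup_markdown_py (md : String) (out : String) : Prop := out = cleanup_markdown_py_alt md
instance (md : String) (out : String) : Decidable (Spec_cleanup_markdown_py md out) := by unfold Spec_cleanup_markdown_py; infer_instance

-- ===== CLAIM (what is proved, stated in full; the proofs are below) =====
def Claim_equal_cleanup_markdown_py : Prop := ∀ (md : String), Dom_cleanup_markdown_py md → Spec_cleanup_markdown_py md (cleanup_markdown_py md)

-- ===== LEMMAS AND PROOFS =====

-- dropping chars satisfying p (p ⊆ q) first does not change dropWhile q
theorem pv_dropWhile_dropWhile {p q : Char → Bool} (hpq : ∀ c, p c = true → q c = true) :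
    ∀ (l : List Char), List.dropWhile q (List.dropWhile p l) = List.dropWhile q l := by
  intro l
  induction l with
  | nil => rfl
  | cons c t ih =>
    by_cases hp : p c = true
    · rw [List.dropWhile_cons_of_pos hp, List.dropWhile_cons_of_pos (hpq c hp), ih]
    · rw [List.dropWhile_cons_of_neg hp]

-- rstrip ∘ rstrip("\n\r") = rstrip
theorem pv_rstrip_rstripNR (l : List Char) :
    PySem.Chars.rstrip (pvRstripNR l) = PySem.Chars.rstrip l := by
  unfold PySem.Chars.rstrip pvRstripNR
  rw [List.reverse_reverse]
  rw [pv_dropWhile_dropWhile (p := fun c => c == '\n' || c == '\r') (q := PySem.Chars.isspace)]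
  intro c hc
  simp at hc
  rcases hc with h | h <;> subst h <;> decide

theorem pv_rstrip_cons_of_neg {c : Char} (h : PySem.Chars.isspace c = false) (t : List Char) :
    PySem.Chars.rstrip (c :: t) = c :: PySem.Chars.rstrip t := by
  unfold PySem.Chars.rstrip
  rw [List.reverse_cons, List.dropWhile_append]
  split
  · next he =>
    simp only [List.isEmpty_iff] at he
    simp [he, List.dropWhile, h]
  · simp

theorem pv_rstrip_cons_of_pos {c : Char} (h : PySem.Chars.isspace c = true) (t : List Char) :
    PySem.Chars.rstrip (c :: t) =
      if PySem.Chars.rstrip t = [] then [] else c :: PySem.Chars.rstrip t := by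
  unfold PySem.Chars.rstrip
  rw [List.reverse_cons, List.dropWhile_append]
  split
  · next he =>
    simp only [List.isEmpty_iff] at he
    simp [he, List.dropWhile, h]
  · next he =>
    simp only [List.isEmpty_iff] at he
    simp [he]

-- stripping the two ends commutes
theorem pv_strip_comm (l : List Char) :
    PySem.Chars.strip l = PySem.Chars.lstrip (PySem.Chars.rstrip l) := by
  induction l with
  | nil => rfl
  | cons c t ih =>
    by_cases hc : PySem.Chars.isspace c = true
    · rw [show PySem.Chars.strip (c :: t) = PySem.Chars.rstrip (PySem.Chars.lstrip (c :: t)) from rfl,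
        show PySem.Chars.lstrip (c :: t) = List.dropWhile PySem.Chars.isspace (c :: t) from rfl,
        List.dropWhile_cons_of_pos hc, pv_rstrip_cons_of_pos hc]
      have ih' : PySem.Chars.rstrip (List.dropWhile PySem.Chars.isspace t)
          = PySem.Chars.lstrip (PySem.Chars.rstrip t) := ih
      split
      · next he => rw [ih', he]
      · next he =>
        rw [ih', show PySem.Chars.lstrip (c :: PySem.Chars.rstrip t)
            = List.dropWhile PySem.Chars.isspace (c :: PySem.Chars.rstrip t) from rfl,
          List.dropWhile_cons_of_pos hc]
        rfl
    · have hc' : PySem.Chars.isspace c = false := by simpa using hc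
      rw [show PySem.Chars.strip (c :: t) = PySem.Chars.rstrip (PySem.Chars.lstrip (c :: t)) from rfl,
        show PySem.Chars.lstrip (c :: t) = List.dropWhile PySem.Chars.isspace (c :: t) from rfl,
        List.dropWhile_cons_of_neg hc, pv_rstrip_cons_of_neg hc',
        show PySem.Chars.lstrip (c :: PySem.Chars.rstrip t)
            = List.dropWhile PySem.Chars.isspace (c :: PySem.Chars.rstrip t) from rfl,
        List.dropWhile_cons_of_neg hc]

-- strip ∘ rstrip("\n\r") = strip
theorem pv_strip_rstripNR (l : List Char) :
    PySem.Chars.strip (pvRstripNR l) = PySem.Chars.strip l := by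
  rw [pv_strip_comm, pv_strip_comm, pv_rstrip_rstripNR]

-- A's non-code cleaning of one segment, parameterised by the incoming blank_streak
def pvCgo2 : List (List Char) → Int → List (List Char)
  | [], _ => []
  | s :: tl, bs =>
    if s = [] then (if bs + 1 ≤ 1 then [([] : List Char)] else []) ++ pvCgo2 tl (bs + 1)
    else s :: pvCgo2 tl 0

theorem pv_cgo2_spec : ∀ (l : List (List Char)) (bs : Int), 0 ≤ bs →
    pvCgo2 l bs = if bs ≤ 0 then pvCgo l else pvCgo (l.dropWhile (· = [])) := by
  intro l
  induction l with
  | nil => intro bs _; simp [pvCgo2, pvCgo]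
  | cons s tl ih =>
    intro bs hbs
    by_cases hs : s = []
    · subst hs
      rw [show pvCgo2 ([] :: tl) bs
          = (if bs + 1 ≤ 1 then [([] : List Char)] else []) ++ pvCgo2 tl (bs + 1) from by
        simp [pvCgo2]]
      rw [ih (bs + 1) (by omega), if_neg (by omega : ¬ (bs + 1 ≤ 0))]
      by_cases h0 : bs ≤ 0
      · have hbz : bs = 0 := le_antisymm h0 hbs
        subst hbz
        rw [if_pos (by omega), if_pos h0]
        rw [show pvCgo ([] :: tl) = [] :: pvCgo (tl.dropWhile (· = [])) from by
          rw [pvCgo]; simp]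
        rfl
      · rw [if_neg (by omega), if_neg h0]
        rw [show ([] :: tl).dropWhile (· = ([] : List Char)) = tl.dropWhile (· = []) from by
          rw [List.dropWhile_cons_of_pos (by simp)]]
        simp
    · rw [show pvCgo2 (s :: tl) bs = s :: pvCgo2 tl 0 from by simp [pvCgo2, hs]]
      rw [ih 0 le_rfl, if_pos le_rfl]
      have hc : pvCgo (s :: tl) = s :: pvCgo tl := by rw [pvCgo]; simp [hs]
      by_cases h0 : bs ≤ 0
      · rw [if_pos h0, hc]
      · rw [if_neg h0]
        rw [show (s :: tl).dropWhile (· = ([] : List Char)) = s :: tl from by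
          rw [List.dropWhile_cons_of_neg (by simp [hs])]]
        rw [hc]

-- pvBGo unfolding: no fence left
theorem pvBGo_nil_case {lines : List (List Char)} {ic : Bool}
    (h : lines.dropWhile (fun l => !pvIsFence l) = []) :
    pvBGo lines ic = (if ic then lines.takeWhile (fun l => !pvIsFence l)
      else pvCollapse (lines.takeWhile (fun l => !pvIsFence l))) := by
  rw [pvBGo]
  split
  · rfl
  · next f tl heq => rw [h] at heq; cases heq

-- pvBGo unfolding: a fence line follows the first segment
theorem pvBGo_cons_case {lines : List (List Char)} {f : List Char} {tl : List (List Char)} {ic : Bool}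
    (h : lines.dropWhile (fun l => !pvIsFence l) = f :: tl) :
    pvBGo lines ic = (if ic then lines.takeWhile (fun l => !pvIsFence l)
      else pvCollapse (lines.takeWhile (fun l => !pvIsFence l)))
      ++ PySem.Chars.rstrip f :: pvBGo tl (!ic) := by
  rw [pvBGo]
  split
  · next heq => rw [h] at heq; cases heq
  · next f' tl' heq =>
    rw [h] at heq
    injection heq with h1 h2
    subst h1; subst h2
    rfl

-- processing a fence-free segment in code mode: emitted verbatim
theorem pv_segCode : ∀ (seg : List (List Char)), (∀ x ∈ seg, pvIsFence x = false) →
    ∀ (rest out : List (List Char)) (bs : Int), ∃ bs',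
      pvALoop (seg ++ rest) out true bs = pvALoop rest (out ++ seg) true bs' := by
  intro seg
  induction seg with
  | nil => intro _ rest out bs; exact ⟨bs, by simp⟩
  | cons ln tl ih =>
    intro hf rest out bs
    have hfence : PySem.Chars.startswith (PySem.Chars.strip (pvRstripNR ln)) ['`', '`', '`'] = false := by
      rw [pv_strip_rstripNR]; exact hf ln (by simp)
    obtain ⟨bs', hrec⟩ := ih (fun x hx => hf x (by simp [hx])) rest (out ++ [ln])
      (if PySem.Chars.strip ln = [] then bs + 1 else 0)
    refine ⟨bs', ?_⟩
    rw [List.cons_append]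
    rw [show pvALoop (ln :: (tl ++ rest)) out true bs
        = pvALoop (tl ++ rest) (out ++ [ln]) true
            (if PySem.Chars.strip ln = [] then bs + 1 else 0) from by
      simp [pvALoop, hfence]]
    rw [hrec]
    simp

-- processing a fence-free segment in text mode: emitted as pvCgo2 of the rstripped lines
theorem pv_segText : ∀ (seg : List (List Char)), (∀ x ∈ seg, pvIsFence x = false) →
    ∀ (rest out : List (List Char)) (bs : Int), ∃ bs',
      pvALoop (seg ++ rest) out false bs =
        pvALoop rest (out ++ pvCgo2 (seg.map PySem.Chars.rstrip) bs) false bs' := by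
  intro seg
  induction seg with
  | nil => intro _ rest out bs; exact ⟨bs, by simp [pvCgo2]⟩
  | cons ln tl ih =>
    intro hf rest out bs
    have hfence : PySem.Chars.startswith (PySem.Chars.strip (pvRstripNR ln)) ['`', '`', '`'] = false := by
      rw [pv_strip_rstripNR]; exact hf ln (by simp)
    have hmap : (ln :: tl).map PySem.Chars.rstrip
        = PySem.Chars.rstrip ln :: tl.map PySem.Chars.rstrip := rfl
    by_cases ht : PySem.Chars.rstrip ln = []
    · by_cases h1 : bs + 1 ≤ 1
      · obtain ⟨bs', hrec⟩ := ih (fun x hx => hf x (by simp [hx])) rest (out ++ [[]]) (bs + 1)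
        refine ⟨bs', ?_⟩
        rw [List.cons_append]
        rw [show pvALoop (ln :: (tl ++ rest)) out false bs
            = pvALoop (tl ++ rest) (out ++ [[]]) false (bs + 1) from by
          simp [pvALoop, hfence, pv_rstrip_rstripNR, ht, h1]]
        rw [hrec, hmap]
        rw [show pvCgo2 (PySem.Chars.rstrip ln :: tl.map PySem.Chars.rstrip) bs
            = [([] : List Char)] ++ pvCgo2 (tl.map PySem.Chars.rstrip) (bs + 1) from by
          simp [pvCgo2, ht, h1]]
        simp
      · obtain ⟨bs', hrec⟩ := ih (fun x hx => hf x (by simp [hx])) rest out (bs + 1)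
        refine ⟨bs', ?_⟩
        rw [List.cons_append]
        rw [show pvALoop (ln :: (tl ++ rest)) out false bs
            = pvALoop (tl ++ rest) out false (bs + 1) from by
          simp [pvALoop, hfence, pv_rstrip_rstripNR, ht, h1]]
        rw [hrec, hmap]
        rw [show pvCgo2 (PySem.Chars.rstrip ln :: tl.map PySem.Chars.rstrip) bs
            = pvCgo2 (tl.map PySem.Chars.rstrip) (bs + 1) from by
          simp [pvCgo2, ht, h1]]
    · obtain ⟨bs', hrec⟩ := ih (fun x hx => hf x (by simp [hx])) rest
        (out ++ [PySem.Chars.rstrip ln]) 0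
      refine ⟨bs', ?_⟩
      rw [List.cons_append]
      rw [show pvALoop (ln :: (tl ++ rest)) out false bs
          = pvALoop (tl ++ rest) (out ++ [PySem.Chars.rstrip ln]) false 0 from by
        simp [pvALoop, hfence, pv_rstrip_rstripNR, ht]]
      rw [hrec, hmap]
      rw [show pvCgo2 (PySem.Chars.rstrip ln :: tl.map PySem.Chars.rstrip) bs
          = PySem.Chars.rstrip ln :: pvCgo2 (tl.map PySem.Chars.rstrip) 0 from by
        simp [pvCgo2, ht]]
      simp

theorem pv_main : ∀ (n : Nat) (lines : List (List Char)), lines.length ≤ n →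
    ∀ (out : List (List Char)) (ic : Bool) (bs : Int), (ic = false → bs = 0) →
      pvALoop lines out ic bs = out ++ pvBGo lines ic := by
  intro n
  induction n with
  | zero =>
    intro lines hlen out ic bs _
    have hnil : lines = [] := List.eq_nil_of_length_eq_zero (Nat.le_zero.mp hlen)
    subst hnil
    rw [pvALoop, pvBGo_nil_case (by simp)]
    cases ic <;> simp [pvCollapse, pvCgo]
  | succ n ihn =>
    intro lines hlen out ic bs hbs
    have hsplit : lines.takeWhile (fun l => !pvIsFence l)
        ++ lines.dropWhile (fun l => !pvIsFence l) = lines := List.takeWhile_append_dropWhile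
    have hseg : ∀ x ∈ lines.takeWhile (fun l => !pvIsFence l), pvIsFence x = false := by
      intro x hx
      have := List.mem_takeWhile_imp hx
      simpa using this
    cases hdw : lines.dropWhile (fun l => !pvIsFence l) with
    | nil =>
      rw [pvBGo_nil_case hdw]
      conv_lhs => rw [← hsplit, hdw]
      cases ic with
      | true =>
        obtain ⟨bs', hA⟩ := pv_segCode _ hseg [] out bs
        rw [hA, pvALoop]
        simp
      | false =>
        obtain ⟨bs', hA⟩ := pv_segText _ hseg [] out bs
        rw [hA, pvALoop]
        rw [hbs rfl] at *
        rw [pv_cgo2_spec _ 0 le_rfl, if_pos le_rfl]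
        simp [pvCollapse]
    | cons f tl =>
      have hfT : pvIsFence f = true := by
        have h2 := List.head?_dropWhile_not (fun l => !pvIsFence l) lines
        rw [hdw] at h2
        simpa using h2
      have hfence : PySem.Chars.startswith (PySem.Chars.strip (pvRstripNR f)) ['`', '`', '`'] = true := by
        rw [pv_strip_rstripNR]; exact hfT
      have hlen' : tl.length ≤ n := by
        have hle := List.length_dropWhile_le (fun l => !pvIsFence l) lines
        rw [hdw] at hle
        simp at hle
        omega
      rw [pvBGo_cons_case hdw]
      conv_lhs => rw [← hsplit, hdw]
      cases ic with
      | true =>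
        obtain ⟨bs', hA⟩ := pv_segCode _ hseg (f :: tl) out bs
        rw [hA]
        rw [show pvALoop (f :: tl) (out ++ lines.takeWhile (fun l => !pvIsFence l)) true bs'
            = pvALoop tl ((out ++ lines.takeWhile (fun l => !pvIsFence l))
                ++ [PySem.Chars.rstrip (pvRstripNR f)]) false 0 from by
          simp [pvALoop, hfence]]
        rw [ihn tl hlen' _ false 0 (fun _ => rfl), pv_rstrip_rstripNR]
        simp
      | false =>
        obtain ⟨bs', hA⟩ := pv_segText _ hseg (f :: tl) out bs
        rw [hA]
        rw [hbs rfl] at *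
        rw [pv_cgo2_spec _ 0 le_rfl, if_pos le_rfl]
        rw [show pvALoop (f :: tl)
              (out ++ pvCgo ((lines.takeWhile (fun l => !pvIsFence l)).map PySem.Chars.rstrip)) false bs'
            = pvALoop tl ((out ++ pvCgo ((lines.takeWhile (fun l => !pvIsFence l)).map PySem.Chars.rstrip))
                ++ [PySem.Chars.rstrip (pvRstripNR f)]) true 0 from by
          simp [pvALoop, hfence]]
        rw [ihn tl hlen' _ true 0 (fun h => by cases h), pv_rstrip_rstripNR]
        simp [pvCollapse]

-- ===== VERDICT (by name: the statement is the Claim_ definition above) =====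
theorem cleanup_markdown_py_spec : Claim_equal_cleanup_markdown_py := by
  intro md _
  show cleanup_markdown_py md = cleanup_markdown_py_alt md
  show String.ofList (PySem.Chars.join ['\n'] (pvALoop (PySem.Chars.splitlines md.toList) [] false 0) ++
      (if PySem.Chars.endswith md.toList ['\n'] then ['\n'] else []))
    = String.ofList (PySem.Chars.join ['\n'] (pvBGo (PySem.Chars.splitlines md.toList) false) ++
      (if PySem.Chars.endswith md.toList ['\n'] then ['\n'] else []))
  rw [pv_main (PySem.Chars.splitlines md.toList).length _ le_rfl [] false 0 (fun _ => rfl)]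
  rfl
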